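-- pv_equiv track=rewrite | github.com/buddy-compiler/buddy-mlir | tests/Python/AtenOpsCoverage/generate_op_catalog.py | _normalize_namespaces
-- ===== SOURCE A (Python) =====
-- from typing import Dict, Iterable, List, Optional, Sequence, Set, Tuple
--
-- def _normalize_namespaces(raw: Sequence[str]) -> List[str]:
--     namespaces: List[str] = []
--     for item in raw:
--         for part in item.split(","):
--             part = part.strip()
--             if part:
--                 namespaces.append(part)
--     return namespaces
-- ===== SOURCE B (Python) =====
-- from typing import List, Sequence
--
--
-- def _normalize_namespaces(raw: Sequence[str]) -> List[str]:
--     # Character-level scanner: one pass per string, emitting tokens at commas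
--     # and at end-of-string; leading whitespace is skipped, internal whitespace
--     # is buffered and only committed when more non-space text follows, so
--     # trailing whitespace is never emitted.  No split()/strip() calls.
--     out: List[str] = []
--     for item in raw:
--         token: List[str] = []
--         pending: List[str] = []
--         for c in item:
--             if c == ',':
--                 if token:
--                     out.append(''.join(token))
--                 token = []
--                 pending = []
--             elif c.isspace():
--                 if token:
--                     pending.append(c)
--             else:
--                 token.extend(pending)
--                 pending = []
--                 token.append(c)
--         if token:
--             out.append(''.join(token))
--     return out
-- ===== Notes on version B (the rewrite author's own statement) =====
-- stated objective: alternative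
-- what changed: Replaces split()/strip() per element by a single character-level state machine that scans each string once, emitting a token at each comma and end-of-string while skipping leading whitespace and buffering internal whitespace so trailing whitespace is never emitted.
import Mathlib
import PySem

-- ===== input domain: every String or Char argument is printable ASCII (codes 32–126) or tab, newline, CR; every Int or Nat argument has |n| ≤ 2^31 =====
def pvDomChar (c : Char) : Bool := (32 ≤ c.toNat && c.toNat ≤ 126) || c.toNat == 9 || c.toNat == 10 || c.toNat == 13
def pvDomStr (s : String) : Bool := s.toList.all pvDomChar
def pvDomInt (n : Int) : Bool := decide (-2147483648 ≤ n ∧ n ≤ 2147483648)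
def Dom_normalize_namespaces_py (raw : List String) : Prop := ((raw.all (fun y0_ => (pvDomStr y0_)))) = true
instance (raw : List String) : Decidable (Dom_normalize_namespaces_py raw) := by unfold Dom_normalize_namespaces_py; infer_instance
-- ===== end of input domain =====

-- B replaces A's split/strip nested loop by a one-pass character-level state machine (alternative decomposition, same cost).

-- ===== PORT A =====
def normalize_namespaces_py (raw : List String) : List String :=
  raw.foldl (fun namespaces item =>
    ((PySem.Str.split? item ",").getD []).foldl (fun namespaces part =>
      let part := PySem.Str.strip part
      if part ≠ "" then namespaces ++ [part] else namespaces) namespaces) []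

-- ===== PORT B =====
-- helper: 'if token: out.append("".join(token))'
def pvEmit (token : List Char) (out : List String) : List String :=
  if token ≠ [] then out ++ [String.ofList token] else out

-- helper: the inner character loop of Source B (state: token, pending, out)
def pvScanItem : List Char → List Char → List Char → List String → List String
  | [], token, _pending, out => pvEmit token out
  | c :: rest, token, pending, out =>
    if c = ',' then pvScanItem rest [] [] (pvEmit token out)
    else if PySem.Chars.isspace c then
      pvScanItem rest token (if token ≠ [] then pending ++ [c] else pending) out
    else pvScanItem rest (token ++ pending ++ [c]) [] out

def normalize_namespaces_py_alt (raw : List String) : List String :=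
  raw.foldl (fun out item => pvScanItem item.toList [] [] out) []

-- ===== PRECONDITION & SPEC =====
def Spec_normalize_namespaces_py (raw : List String) (out : List String) : Prop := out = normalize_namespaces_py_alt raw
instance (raw : List String) (out : List String) : Decidable (Spec_normalize_namespaces_py raw out) := by unfold Spec_normalize_namespaces_py; infer_instance

-- ===== CLAIM (what is proved, stated in full; the proofs are below) =====
def Claim_equal_normalize_namespaces_py : Prop := ∀ (raw : List String), Dom_normalize_namespaces_py raw → Spec_normalize_namespaces_py raw (normalize_namespaces_py raw)

-- ===== LEMMAS AND PROOFS =====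

-- fuel-free specification of splitting a char list on ','
def splitComma : List Char → List (List Char)
  | [] => [[]]
  | c :: rest =>
    if c = ',' then [] :: splitComma rest
    else (splitComma rest).modifyHead (c :: ·)

theorem splitComma_ne_nil (l : List Char) : splitComma l ≠ [] := by
  induction l with
  | nil => simp [splitComma]
  | cons c rest ih =>
    simp only [splitComma]
    split_ifs
    · simp
    · cases h : splitComma rest with
      | nil => exact absurd h ih
      | cons p ps => simp [List.modifyHead]

theorem go_comma_eq (fuel : Nat) (l cur : List Char) (acc : List (List Char))
    (h : l.length < fuel) :
    PySem.Chars.splitOn.go [','] fuel l cur acc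
      = acc.reverse ++ (splitComma l).modifyHead (cur.reverse ++ ·) := by
  induction fuel generalizing l cur acc with
  | zero => omega
  | succ f ih =>
    cases l with
    | nil =>
      simp [PySem.Chars.splitOn.go, splitComma, List.modifyHead]
    | cons c rest =>
      rw [PySem.Chars.splitOn.go]
      by_cases hc : c = ','
      · subst hc
        have hp : List.isPrefixOf [','] (',' :: rest) = true := by
          simp [List.isPrefixOf]
        simp only [hp, if_pos, List.length_cons, List.length_nil, List.drop_succ_cons, List.drop_zero]
        rw [ih rest [] (cur.reverse :: acc) (by simpa using Nat.lt_of_succ_lt_succ h)]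
        simp only [splitComma, List.reverse_cons, List.reverse_nil]
        cases hs : splitComma rest with
        | nil => exact absurd hs (splitComma_ne_nil rest)
        | cons p ps => simp [List.modifyHead]
      · have hp : List.isPrefixOf [','] (c :: rest) = false := by
          simp [List.isPrefixOf]
          exact fun hh => absurd hh.symm hc
        simp only [hp]
        rw [if_neg (by simp)]
        rw [ih rest (c :: cur) acc (by simpa using Nat.lt_of_succ_lt_succ h)]
        simp only [splitComma, if_neg hc, List.reverse_cons]
        cases hs : splitComma rest with
        | nil => exact absurd hs (splitComma_ne_nil rest)
        | cons p ps => simp [List.modifyHead]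

theorem splitOn_comma (s : List Char) :
    PySem.Chars.splitOn s [','] = splitComma s := by
  rw [PySem.Chars.splitOn, go_comma_eq _ _ _ _ (by omega)]
  cases h : splitComma s with
  | nil => exact absurd h (splitComma_ne_nil s)
  | cons p ps => simp [List.modifyHead]

theorem split?_comma (s : String) :
    PySem.Str.split? s "," = some ((PySem.Chars.splitOn s.toList [',']).map String.ofList) := by
  simp [PySem.Str.split?, PySem.Chars.split?]

-- strip-and-filter of the comma pieces of a char list (the common normal form)
def pieces (l : List Char) : List String :=
  ((splitComma l).map (fun p => PySem.Str.strip (String.ofList p))).filter (fun p => p ≠ "")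

theorem inner_foldl_eq (L : List String) (acc : List String) :
    L.foldl (fun ns part =>
        let part := PySem.Str.strip part
        if part ≠ "" then ns ++ [part] else ns) acc
      = acc ++ (L.map PySem.Str.strip).filter (fun p => p ≠ "") := by
  induction L generalizing acc with
  | nil => simp
  | cons x xs ih =>
    simp only [List.foldl_cons, List.map_cons, List.filter_cons, ih]
    by_cases hx : PySem.Str.strip x ≠ ""
    · simp [hx]
    · simp at hx; simp [hx]

theorem A_item (item : String) (acc : List String) :
    ((PySem.Str.split? item ",").getD []).foldl (fun ns part =>
      let part := PySem.Str.strip part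
      if part ≠ "" then ns ++ [part] else ns) acc
      = acc ++ pieces item.toList := by
  rw [split?_comma, Option.getD_some, inner_foldl_eq]
  simp [pieces, splitOn_comma, List.map_map, Function.comp_def]

-- B-side: characterising the state machine --------------------------------

-- pure version of the first-segment scan (no output list)
def firstTok : List Char → List Char → List Char → List Char
  | token, _pending, [] => token
  | token, pending, c :: rest =>
    if PySem.Chars.isspace c then
      firstTok token (if token ≠ [] then pending ++ [c] else pending) rest
    else firstTok (token ++ pending ++ [c]) [] rest

theorem dropWhile_append_cons (p : Char → Bool) (a : List Char) (c : Char) (d : List Char)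
    (hc : p c = false) :
    List.dropWhile p (a ++ c :: d) = List.dropWhile p a ++ c :: d := by
  induction a with
  | nil => simp [List.dropWhile, hc]
  | cons x xs ih =>
    by_cases hx : p x
    · simp [List.dropWhile, hx, ih]
    · simp [List.dropWhile, hx]

theorem rstrip_append_cons (xs : List Char) (c : Char) (ys : List Char)
    (hc : PySem.Chars.isspace c = false) :
    PySem.Chars.rstrip (xs ++ c :: ys) = xs ++ c :: PySem.Chars.rstrip ys := by
  simp only [PySem.Chars.rstrip, List.reverse_append, List.reverse_cons]
  rw [show ys.reverse ++ [c] ++ xs.reverse = ys.reverse ++ c :: xs.reverse by simp]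
  rw [dropWhile_append_cons _ _ _ _ hc]
  simp

theorem rstrip_of_all_space (ws : List Char) (h : ∀ x ∈ ws, PySem.Chars.isspace x = true) :
    PySem.Chars.rstrip ws = [] := by
  simp only [PySem.Chars.rstrip]
  rw [List.dropWhile_eq_nil_iff.mpr (by intro x hx; exact h x (List.mem_reverse.mp hx))]
  rfl

theorem firstTok_ne_nil (l : List Char) : ∀ (token pending : List Char), token ≠ [] →
    (∀ x ∈ pending, PySem.Chars.isspace x = true) →
    firstTok token pending l = token ++ PySem.Chars.rstrip (pending ++ l) := by
  induction l with
  | nil =>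
    intro token pending ht hp
    simp only [firstTok, List.append_nil]
    rw [rstrip_of_all_space pending hp, List.append_nil]
  | cons c rest ih =>
    intro token pending ht hp
    simp only [firstTok]
    by_cases hc : PySem.Chars.isspace c
    · have hp' : ∀ x ∈ pending ++ [c], PySem.Chars.isspace x = true := by
        intro x hx
        rcases List.mem_append.mp hx with h1 | h1
        · exact hp x h1
        · simp at h1; subst h1; exact hc
      rw [if_pos hc, if_pos ht, ih token (pending ++ [c]) ht hp']
      simp
    · rw [if_neg hc, ih (token ++ pending ++ [c]) [] (by simp) (by simp)]
      rw [rstrip_append_cons pending c rest (by simpa using hc)]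
      simp

theorem firstTok_strip (l : List Char) :
    firstTok [] [] l = PySem.Chars.strip l := by
  induction l with
  | nil => rfl
  | cons c rest ih =>
    simp only [firstTok]
    by_cases hc : PySem.Chars.isspace c
    · rw [if_pos hc]
      rw [show (if ([] : List Char) ≠ [] then ([] : List Char) ++ [c] else []) = [] by simp, ih]
      simp [PySem.Chars.strip, PySem.Chars.lstrip, List.dropWhile, hc]
    · rw [if_neg hc]
      simp only [List.nil_append]
      rw [firstTok_ne_nil rest [c] [] (by simp) (by simp)]
      simp only [List.nil_append]
      rw [show PySem.Chars.strip (c :: rest)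
            = PySem.Chars.rstrip (c :: rest) by
          simp [PySem.Chars.strip, PySem.Chars.lstrip, List.dropWhile, hc]]
      rw [show (c :: rest : List Char) = [] ++ c :: rest by rfl,
        rstrip_append_cons [] c rest (by simpa using hc)]
      simp

theorem pvEmit_strip (s : List Char) (out : List String) :
    pvEmit (firstTok [] [] s) out
      = out ++ List.filter (fun p => p ≠ "") [PySem.Str.strip (String.ofList s)] := by
  rw [firstTok_strip, pvEmit]
  have hts : (PySem.Str.strip (String.ofList s)) = String.ofList (PySem.Chars.strip s) := by
    simp [PySem.Str.strip]
  by_cases h : PySem.Chars.strip s = []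
  · simp [h, hts]
  · rw [if_pos h]
    have : String.ofList (PySem.Chars.strip s) ≠ "" := by
      intro hh
      exact h (by simpa using congrArg String.toList hh)
    simp [hts, List.filter, this]

def tailPieces (l : List Char) : List String :=
  ((splitComma l).tail.map (fun p => PySem.Str.strip (String.ofList p))).filter (fun p => p ≠ "")

theorem scan_eq (l : List Char) : ∀ (token pending : List Char) (out : List String),
    pvScanItem l token pending out
      = pvEmit (firstTok token pending (splitComma l).headI) out ++ tailPieces l := by
  induction l with
  | nil =>
    intro token pending out
    simp [pvScanItem, splitComma, tailPieces, firstTok]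
  | cons c rest ih =>
    intro token pending out
    by_cases hc : c = ','
    · subst hc
      rw [show pvScanItem (',' :: rest) token pending out
            = pvScanItem rest [] [] (pvEmit token out) by simp [pvScanItem]]
      rw [ih]
      have hsp : splitComma (',' :: rest) = [] :: splitComma rest := by simp [splitComma]
      cases hs : splitComma rest with
      | nil => exact absurd hs (splitComma_ne_nil rest)
      | cons h t =>
        rw [show ((h :: t : List (List Char))).headI = h from rfl, pvEmit_strip,
          show firstTok token pending ((splitComma (',' :: rest)).headI) = token by
            rw [hsp]; rfl]
        simp only [tailPieces, hsp, hs, List.tail_cons, List.map_cons, List.filter_cons]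
        by_cases he : PySem.Str.strip (String.ofList h) ≠ ""
        · simp [he, List.filter]
        · simp only [ne_eq, Decidable.not_not] at he
          simp [he, List.filter]
    · have hsp : splitComma (c :: rest) = (splitComma rest).modifyHead (c :: ·) := by
        simp [splitComma, hc]
      cases hs : splitComma rest with
      | nil => exact absurd hs (splitComma_ne_nil rest)
      | cons h t =>
        have hheadI : (splitComma (c :: rest)).headI = c :: h := by
          rw [hsp, hs]; simp [List.modifyHead]
        have htail : tailPieces (c :: rest) = tailPieces rest := by
          simp [tailPieces, hsp, hs, List.modifyHead]
        by_cases hw : PySem.Chars.isspace c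
        · rw [show pvScanItem (c :: rest) token pending out
              = pvScanItem rest token (if token ≠ [] then pending ++ [c] else pending) out by
            simp [pvScanItem, hc, hw]]
          rw [ih, hheadI, htail]
          simp only [firstTok, if_pos hw, hs, List.headI]
        · rw [show pvScanItem (c :: rest) token pending out
              = pvScanItem rest (token ++ pending ++ [c]) [] out by
            simp [pvScanItem, hc, hw]]
          rw [ih, hheadI, htail]
          simp only [firstTok, if_neg hw, hs, List.headI]

theorem B_item (s : List Char) (out : List String) :
    pvScanItem s [] [] out = out ++ pieces s := by
  rw [scan_eq, pvEmit_strip]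
  cases hs : splitComma s with
  | nil => exact absurd hs (splitComma_ne_nil s)
  | cons h t =>
    simp only [pieces, tailPieces, hs, List.headI, List.tail_cons, List.map_cons, List.filter_cons]
    by_cases he : PySem.Str.strip (String.ofList h) = ""
    · simp [he, List.filter]
    · simp [he, List.filter]

theorem both_eq (raw : List String) :
    normalize_namespaces_py raw = normalize_namespaces_py_alt raw := by
  unfold normalize_namespaces_py normalize_namespaces_py_alt
  have key : ∀ acc : List String,
      raw.foldl (fun namespaces item =>
        ((PySem.Str.split? item ",").getD []).foldl (fun ns part =>
          let part := PySem.Str.strip part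
          if part ≠ "" then ns ++ [part] else ns) namespaces) acc
      = raw.foldl (fun out item => pvScanItem item.toList [] [] out) acc := by
    induction raw with
    | nil => intro acc; rfl
    | cons x xs ih =>
      intro acc
      simp only [List.foldl_cons]
      rw [A_item, B_item, ih]
  exact key []

-- ===== VERDICT (by name: the statement is the Claim_ definition above) =====
theorem normalize_namespaces_py_spec : Claim_equal_normalize_namespaces_py := by
  intro raw _
  unfold Spec_normalize_namespaces_py
  exact both_eq raw
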